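-- pv_equiv track=rewrite | github.com/tboxtra/madridista-bot | orchestrator/fallback_system.py | _generate_alternative_parameters
-- ===== SOURCE A (Python) =====
-- from typing import Dict, List, Any, Optional, Tuple
--
-- def _generate_alternative_parameters(tool_name: str, entities: List[Dict],
--                                    modified_parameters: Dict[str, Any]) -> Dict[str, Any]:
--     """Generate parameters for alternative tools."""
--
--     # Use modified parameters if available
--     if modified_parameters:
--         return modified_parameters
--
--     # Generate basic parameters from entities
--     parameters = {}
--     entity_by_type = {}
--
--     for entity in entities:
--         entity_type = entity.get("type", "")
--         if entity_type not in entity_by_type: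
--             entity_by_type[entity_type] = []
--         entity_by_type[entity_type].append(entity.get("value", ""))
--
--     # Map entities to tool parameters
--     if "team" in entity_by_type:
--         teams = entity_by_type["team"]
--         if len(teams) >= 1:
--             parameters["team_name"] = teams[0]
--         if len(teams) >= 2:
--             parameters["team_a"] = teams[0]
--             parameters["team_b"] = teams[1]
--
--     if "player" in entity_by_type:
--         players = entity_by_type["player"]
--         if players:
--             parameters["player_name"] = players[0]
--         if len(players) >= 2:
--             parameters["player_a"] = players[0]
--             parameters["player_b"] = players[1]
--
--     return parameters
-- ===== SOURCE B (Python) =====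
-- from typing import Dict, List, Any
--
-- def _generate_alternative_parameters(tool_name: str, entities: List[Dict],
--                                    modified_parameters: Dict[str, Any]) -> Dict[str, Any]:
--     """Single pass with four fixed slots and early exit; no grouping dict or per-type lists."""
--     if modified_parameters:
--         return modified_parameters
--
--     t0 = t1 = p0 = p1 = None  # first/second team value, first/second player value
--     for e in entities:
--         ty = e.get("type", "")
--         if ty == "team":
--             if t0 is None:
--                 t0 = e.get("value", "")
--             elif t1 is None:
--                 t1 = e.get("value", "")
--         elif ty == "player":
--             if p0 is None:
--                 p0 = e.get("value", "")
--             elif p1 is None: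
--                 p1 = e.get("value", "")
--         if t1 is not None and p1 is not None:
--             break  # all slots filled; the rest of the scan cannot change anything
--
--     parameters = {}
--     if t0 is not None:
--         parameters["team_name"] = t0
--     if t1 is not None:
--         parameters["team_a"] = t0
--         parameters["team_b"] = t1
--     if p0 is not None:
--         parameters["player_name"] = p0
--     if p1 is not None:
--         parameters["player_a"] = p0
--         parameters["player_b"] = p1
--     return parameters
-- ===== Notes on version B (the rewrite author's own statement) =====
-- stated objective: alternative
-- what changed: Replaces A's entity_by_type grouping dict of per-type value lists with a single pass over entities maintaining four fixed Option slots (first/second team, first/second player) with an early exit once all slots are filled; the parameters dict is then assembled from the slots.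
import Mathlib
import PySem

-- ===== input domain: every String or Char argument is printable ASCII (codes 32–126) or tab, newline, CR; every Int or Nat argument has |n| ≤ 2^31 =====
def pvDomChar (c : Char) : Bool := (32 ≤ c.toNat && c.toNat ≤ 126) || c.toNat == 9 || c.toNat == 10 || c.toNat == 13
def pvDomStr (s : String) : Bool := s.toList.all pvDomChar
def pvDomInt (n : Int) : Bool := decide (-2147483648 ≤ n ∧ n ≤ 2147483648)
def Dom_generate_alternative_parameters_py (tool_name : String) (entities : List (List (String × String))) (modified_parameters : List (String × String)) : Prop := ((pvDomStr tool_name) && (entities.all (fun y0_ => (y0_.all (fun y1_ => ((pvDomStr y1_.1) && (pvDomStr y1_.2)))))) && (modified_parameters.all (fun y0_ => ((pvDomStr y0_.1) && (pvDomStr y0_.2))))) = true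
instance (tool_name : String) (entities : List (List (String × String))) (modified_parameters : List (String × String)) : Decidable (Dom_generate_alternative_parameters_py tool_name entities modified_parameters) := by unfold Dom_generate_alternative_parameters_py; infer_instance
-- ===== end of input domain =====

-- B replaces A's entity_by_type grouping dict of per-type lists with a single scan keeping four
-- fixed Option slots (first/second team value, first/second player value) and an early exit once
-- all four are filled; objective: alternative (same O(n) cost, O(1) auxiliary state).

-- shared helper: entity.get(key, dflt) — first-match lookup in the entity's association list
def pvEntGet (e : List (String × String)) (key dflt : String) : String :=
  match e.find? (fun p => p.1 == key) with
  | some p => p.2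
  | none => dflt

-- ===== PORT A =====
def generate_alternative_parameters_py (tool_name : String) (entities : List (List (String × String))) (modified_parameters : List (String × String)) : List (String × String) :=
  -- if modified_parameters: return modified_parameters
  if modified_parameters.isEmpty then
    -- build entity_by_type (grouping dict), appending entity.get("value","") under entity.get("type","")
    let entity_by_type : PySem.Dict String (List String) :=
      entities.foldl (fun d e =>
        let t := pvEntGet e "type" ""
        let d := if d.contains t then d else d.insert t []
        d.modify t [] (fun l => l ++ [pvEntGet e "value" ""])) PySem.Dict.empty
    -- parameters dict, built in insertion order (all keys distinct, so each assignment appends)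
    let parameters : List (String × String) := []
    let parameters :=
      if entity_by_type.contains "team" then
        let teams := entity_by_type.getD "team" []   -- dict["team"], guarded by the contains check
        let parameters := if teams.length ≥ 1 then parameters ++ [("team_name", teams.headD "")] else parameters
        if teams.length ≥ 2 then parameters ++ [("team_a", teams.headD ""), ("team_b", (teams.drop 1).headD "")] else parameters
      else parameters
    let parameters :=
      if entity_by_type.contains "player" then
        let players := entity_by_type.getD "player" []
        let parameters := if players.length ≥ 1 then parameters ++ [("player_name", players.headD "")] else parameters
        if players.length ≥ 2 then parameters ++ [("player_a", players.headD ""), ("player_b", (players.drop 1).headD "")] else parameters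
      else parameters
    parameters
  else modified_parameters

-- ===== PORT B =====
-- the single-pass slot scan of Source B: four Option slots, early break once t1 and p1 are both filled
def pvFillSlots : List (List (String × String)) → Option String → Option String → Option String → Option String → (Option String × Option String × Option String × Option String)
  | [], t0, t1, p0, p1 => (t0, t1, p0, p1)
  | e :: es, t0, t1, p0, p1 =>
    let ty := pvEntGet e "type" ""
    let s :=
      if ty == "team" then
        if t0.isNone then (some (pvEntGet e "value" ""), t1, p0, p1)
        else if t1.isNone then (t0, some (pvEntGet e "value" ""), p0, p1)
        else (t0, t1, p0, p1)
      else if ty == "player" then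
        if p0.isNone then (t0, t1, some (pvEntGet e "value" ""), p1)
        else if p1.isNone then (t0, t1, p0, some (pvEntGet e "value" ""))
        else (t0, t1, p0, p1)
      else (t0, t1, p0, p1)
    if s.2.1.isSome && s.2.2.2.isSome then s       -- break
    else pvFillSlots es s.1 s.2.1 s.2.2.1 s.2.2.2

def generate_alternative_parameters_py_alt (tool_name : String) (entities : List (List (String × String))) (modified_parameters : List (String × String)) : List (String × String) :=
  if modified_parameters.isEmpty then
    let s := pvFillSlots entities none none none none
    let ps : List (String × String) := []
    let ps := match s.1 with | some a => ps ++ [("team_name", a)] | none => ps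
    let ps := match s.1, s.2.1 with | some a, some b => ps ++ [("team_a", a), ("team_b", b)] | _, _ => ps
    let ps := match s.2.2.1 with | some a => ps ++ [("player_name", a)] | none => ps
    match s.2.2.1, s.2.2.2 with | some a, some b => ps ++ [("player_a", a), ("player_b", b)] | _, _ => ps
  else modified_parameters

-- ===== PRECONDITION & SPEC =====
def Spec_generate_alternative_parameters_py (tool_name : String) (entities : List (List (String × String))) (modified_parameters : List (String × String)) (out : List (String × String)) : Prop := out = generate_alternative_parameters_py_alt tool_name entities modified_parameters
instance (tool_name : String) (entities : List (List (String × String))) (modified_parameters : List (String × String)) (out : List (String × String)) : Decidable (Spec_generate_alternative_parameters_py tool_name entities modified_parameters out) := by unfold Spec_generate_alternative_parameters_py; infer_instance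

-- ===== CLAIM (what is proved, stated in full; the proofs are below) =====
def Claim_equal_generate_alternative_parameters_py : Prop := ∀ (tool_name : String) (entities : List (List (String × String))) (modified_parameters : List (String × String)), Dom_generate_alternative_parameters_py tool_name entities modified_parameters → Spec_generate_alternative_parameters_py tool_name entities modified_parameters (generate_alternative_parameters_py tool_name entities modified_parameters)

-- ===== LEMMAS AND PROOFS =====

-- the per-type value lists (proof-only abbreviation)
def pvVals (es : List (List (String × String))) (c : String) : List String :=
  (es.filter (fun e => pvEntGet e "type" "" == c)).map (fun e => pvEntGet e "value" "")

-- filling a pair of slots from a list (proof-only characterisation of the scan)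
def pvFill2 (t0 t1 : Option String) (xs : List String) : Option String × Option String :=
  match t0, t1 with
  | some a, some b => (some a, some b)
  | some a, none => (some a, xs.head?)
  | none, _ => (xs[0]?, xs[1]?)

-- A's grouping fold, looked up at any key, is exactly the per-type value list.
theorem groupFold_getD (es : List (List (String × String))) (d : PySem.Dict String (List String)) (c : String) :
    (es.foldl (fun d e =>
        let t := pvEntGet e "type" ""
        let d := if d.contains t then d else d.insert t []
        d.modify t [] (fun l => l ++ [pvEntGet e "value" ""])) d).getD c []
    = d.getD c [] ++ pvVals es c := by
  induction es generalizing d with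
  | nil => simp [pvVals]
  | cons e es ih =>
    simp only [List.foldl_cons, ih, pvVals, List.filter_cons]
    by_cases hc : d.contains (pvEntGet e "type" "")
    · by_cases ht : pvEntGet e "type" "" = c
      · subst ht; simp [hc, PySem.Dict.getD_modify]
      · have hne : ¬ (c = pvEntGet e "type" "") := fun h => ht h.symm
        simp [hc, PySem.Dict.getD_modify, hne, ht]
    · have hc' : d.contains (pvEntGet e "type" "") = false := by simpa using hc
      by_cases ht : pvEntGet e "type" "" = c
      · subst ht
        simp [hc', PySem.Dict.getD_modify, PySem.Dict.getD_insert,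
              PySem.Dict.getD_of_not_contains _ _ hc']
      · have hne : ¬ (c = pvEntGet e "type" "") := fun h => ht h.symm
        simp [hc', PySem.Dict.getD_modify, PySem.Dict.getD_insert, hne, ht]

-- A's contains-guarded parameter block, as a function of the looked-up list only
theorem block_eq (F : PySem.Dict String (List String)) (key nm ka kb : String) (P : List (String × String)) :
    (if F.contains key = true then
       (if (F.getD key []).length ≥ 2 then
          (if (F.getD key []).length ≥ 1 then P ++ [(nm, (F.getD key []).headD "")] else P)
            ++ [(ka, (F.getD key []).headD ""), (kb, ((F.getD key []).drop 1).headD "")]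
        else (if (F.getD key []).length ≥ 1 then P ++ [(nm, (F.getD key []).headD "")] else P))
     else P)
    = P ++ (match F.getD key [] with
            | [] => []
            | [t0] => [(nm, t0)]
            | t0 :: t1 :: _ => [(nm, t0), (ka, t0), (kb, t1)]) := by
  by_cases hc : F.contains key
  · rcases h : F.getD key [] with _ | ⟨t0, _ | ⟨t1, ts⟩⟩ <;> simp [hc, h]
  · have hc' : F.contains key = false := by simpa using hc
    simp [hc', PySem.Dict.getD_of_not_contains _ _ hc']

-- The slot scan computes pvFill2 of the per-type lists (the early exit is harmless:
-- once both second slots are filled, pvFill2 ignores the rest of the list).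
theorem fillSlots_eq (es : List (List (String × String))) :
    ∀ (t0 t1 p0 p1 : Option String), (t1.isSome → t0.isSome) → (p1.isSome → p0.isSome) →
    pvFillSlots es t0 t1 p0 p1
      = (let t := pvFill2 t0 t1 (pvVals es "team")
         let p := pvFill2 p0 p1 (pvVals es "player")
         (t.1, t.2, p.1, p.2)) := by
  induction es with
  | nil =>
    intro t0 t1 p0 p1 ht hp
    rcases t0 with _ | a <;> rcases t1 with _ | b <;>
      rcases p0 with _ | c <;> rcases p1 with _ | d <;>
      first | rfl | simp_all
  | cons e es ih =>
    intro t0 t1 p0 p1 ht hp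
    have hv : ∀ c, pvVals (e :: es) c
        = if (pvEntGet e "type" "" == c) = true then pvEntGet e "value" "" :: pvVals es c
          else pvVals es c := by
      intro c; simp only [pvVals, List.filter_cons]; split <;> simp
    rw [pvFillSlots, hv "team", hv "player"]
    by_cases h1 : (pvEntGet e "type" "" == "team") = true
    · have h2 : (pvEntGet e "type" "" == "player") = false := by
        have h1' : pvEntGet e "type" "" = "team" := by simpa using h1
        simp [h1']
      rcases t0 with _ | a <;> rcases t1 with _ | b <;>
        rcases p0 with _ | c <;> rcases p1 with _ | d <;>
        (try simp at ht) <;> (try simp at hp) <;>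
        (simp only [h1, h2, Bool.false_eq_true, if_true, if_false, ite_true, ite_false,
            Option.isNone_none, Option.isNone_some, Option.isSome_none, Option.isSome_some,
            Bool.false_and, Bool.true_and, Bool.and_false, Bool.and_true, Bool.and_self] <;>
         first
           | rfl
           | (rw [ih _ _ _ _ (by simp) (by simp)] <;>
              first | rfl | simp [pvFill2, List.head?_eq_getElem?]))
    · by_cases h2 : (pvEntGet e "type" "" == "player") = true
      · rcases t0 with _ | a <;> rcases t1 with _ | b <;>
          rcases p0 with _ | c <;> rcases p1 with _ | d <;>
          (try simp at ht) <;> (try simp at hp) <;>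
          (simp only [h1, h2, Bool.false_eq_true, if_true, if_false, ite_true, ite_false,
              Option.isNone_none, Option.isNone_some, Option.isSome_none, Option.isSome_some,
              Bool.false_and, Bool.true_and, Bool.and_false, Bool.and_true, Bool.and_self] <;>
           first
             | rfl
             | (rw [ih _ _ _ _ (by simp) (by simp)] <;>
                first | rfl | simp [pvFill2, List.head?_eq_getElem?]))
      · rcases t0 with _ | a <;> rcases t1 with _ | b <;>
          rcases p0 with _ | c <;> rcases p1 with _ | d <;>
          (try simp at ht) <;> (try simp at hp) <;>
          (simp only [h1, h2, Bool.false_eq_true, if_true, if_false, ite_true, ite_false,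
              Option.isNone_none, Option.isNone_some, Option.isSome_none, Option.isSome_some,
              Bool.false_and, Bool.true_and, Bool.and_false, Bool.and_true, Bool.and_self] <;>
           first
             | rfl
             | (rw [ih _ _ _ _ (by simp) (by simp)] <;>
                first | rfl | simp [pvFill2, List.head?_eq_getElem?]))

-- ===== VERDICT (by name: the statement is the Claim_ definition above) =====
theorem generate_alternative_parameters_py_spec : Claim_equal_generate_alternative_parameters_py := by
  intro tool_name entities modified_parameters _
  show _ = _
  unfold generate_alternative_parameters_py generate_alternative_parameters_py_alt
  by_cases hmp : modified_parameters.isEmpty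
  · simp only [hmp, if_pos]
    rw [block_eq, block_eq, groupFold_getD, groupFold_getD,
        fillSlots_eq entities none none none none (by simp) (by simp)]
    rcases h1 : pvVals entities "team" with _ | ⟨a, _ | ⟨b, ts⟩⟩ <;>
      rcases h2 : pvVals entities "player" with _ | ⟨c, _ | ⟨d, ps⟩⟩ <;>
      simp [pvFill2]
  · simp [hmp]
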